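-- pv_equiv track=rewrite | github.com/jakeibeemassa0908/cosc4315hw3 | infinitearithmetic/bigint.py | _nodes_trim
-- ===== SOURCE A (Python) =====
-- def _nodes_trim(nodes):
--     if not nodes:
--         return [0]
--
--     end, rest = nodes[-1], nodes[:-1]
--     if end != 0:
--         return nodes
--     else:
--         return _nodes_trim(rest)
-- ===== SOURCE B (Python) =====
-- def _nodes_trim(nodes):
--     i = len(nodes)
--     while i > 0 and nodes[i - 1] == 0:
--         i -= 1
--     if i == 0:
--         return [0]
--     return nodes if i == len(nodes) else nodes[:i]
-- ===== Notes on version B (the rewrite author's own statement) =====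
-- stated objective: alternative
-- what changed: Replaces the recursion that re-slices nodes[:-1] at every step with a single backward index scan for the last nonzero element followed by one slice; worst-case cost drops from O(n^2) to O(n), though typical inputs with few trailing zeros show no measured speed-up.
import Mathlib
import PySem

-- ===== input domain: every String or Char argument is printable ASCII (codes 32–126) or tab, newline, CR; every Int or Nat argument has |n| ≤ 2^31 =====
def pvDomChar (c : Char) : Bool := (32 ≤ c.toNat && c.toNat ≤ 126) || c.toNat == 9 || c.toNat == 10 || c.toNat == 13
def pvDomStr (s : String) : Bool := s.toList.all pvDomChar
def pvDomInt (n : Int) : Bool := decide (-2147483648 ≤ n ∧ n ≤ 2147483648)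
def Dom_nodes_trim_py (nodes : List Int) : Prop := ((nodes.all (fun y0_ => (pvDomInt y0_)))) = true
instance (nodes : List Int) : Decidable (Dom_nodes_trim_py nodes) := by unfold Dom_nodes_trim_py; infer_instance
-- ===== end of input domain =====

-- B replaces A's recursive re-slicing with one backward index scan and a single slice (alternative algorithm).

-- ===== PORT A =====
-- nodes[-1] on a nonempty list is its last element; nodes[:-1] is dropLast (PySem.List.slice_to_neg_one).
def nodes_trim_py (nodes : List Int) : List Int :=
  if h : nodes = [] then [0]
  else
    let e := nodes.getLast h
    let rest := nodes.dropLast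
    if e ≠ 0 then nodes else nodes_trim_py rest
termination_by nodes.length
decreasing_by simp [List.length_dropLast]; exact List.length_pos_iff.mpr h

-- ===== PORT B =====
-- the while loop: i starts at len(nodes), decrements while nodes[i-1] == 0
def nodes_trim_idx (nodes : List Int) : Nat → Nat
  | 0 => 0
  | i + 1 => if nodes.getD i 0 = 0 then nodes_trim_idx nodes i else i + 1

-- nodes[:i] with 0 ≤ i ≤ len(nodes) is List.take i
def nodes_trim_py_alt (nodes : List Int) : List Int :=
  let i := nodes_trim_idx nodes nodes.length
  if i = 0 then [0]
  else if i = nodes.length then nodes else nodes.take i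

-- ===== PRECONDITION & SPEC =====
def Spec_nodes_trim_py (nodes : List Int) (out : List Int) : Prop := out = nodes_trim_py_alt nodes
instance (nodes : List Int) (out : List Int) : Decidable (Spec_nodes_trim_py nodes out) := by unfold Spec_nodes_trim_py; infer_instance

-- ===== CLAIM (what is proved, stated in full; the proofs are below) =====
def Claim_equal_nodes_trim_py : Prop := ∀ (nodes : List Int), Dom_nodes_trim_py nodes → Spec_nodes_trim_py nodes (nodes_trim_py nodes)

-- ===== LEMMAS AND PROOFS =====

theorem nodes_trim_idx_le (nodes : List Int) (n : Nat) : nodes_trim_idx nodes n ≤ n := by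
  induction n with
  | zero => simp [nodes_trim_idx]
  | succ i ih => simp only [nodes_trim_idx]; split <;> omega

theorem nodes_trim_idx_append (ns : List Int) (e : Int) (i : Nat) (h : i ≤ ns.length) :
    nodes_trim_idx (ns ++ [e]) i = nodes_trim_idx ns i := by
  induction i with
  | zero => rfl
  | succ j ih =>
    simp only [nodes_trim_idx]
    have hg : (ns ++ [e]).getD j 0 = ns.getD j 0 := by
      simp [List.getD, List.getElem?_append_left (show j < ns.length by omega)]
    rw [hg]; split
    · exact ih (by omega)
    · rfl

theorem alt_append (ns : List Int) (e : Int) :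
    nodes_trim_py_alt (ns ++ [e]) = if e = 0 then nodes_trim_py_alt ns else ns ++ [e] := by
  simp only [nodes_trim_py_alt, List.length_append, List.length_cons, List.length_nil]
  have hget : (ns ++ [e]).getD ns.length 0 = e := by
    simp [List.getD]
  simp only [nodes_trim_idx, hget]
  split
  · rw [nodes_trim_idx_append ns e ns.length (le_refl _)]
    have hle := nodes_trim_idx_le ns ns.length
    by_cases h0 : nodes_trim_idx ns ns.length = 0
    · simp [h0]
    · rw [if_neg h0, if_neg h0]
      by_cases hl : nodes_trim_idx ns ns.length = ns.length
      · rw [if_neg (by omega), if_pos hl, hl,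
            List.take_append_of_le_length (le_refl _), List.take_length]
      · rw [if_neg (by omega), if_neg hl, List.take_append_of_le_length hle]
  · simp

theorem main_eq (nodes : List Int) : nodes_trim_py nodes = nodes_trim_py_alt nodes := by
  induction nodes using List.reverseRecOn with
  | nil => simp [nodes_trim_py, nodes_trim_py_alt, nodes_trim_idx]
  | append_singleton ns e ih =>
    rw [nodes_trim_py, alt_append]
    simp only [dif_neg (by simp : ¬ (ns ++ [e] = []))]
    have hlast : (ns ++ [e]).getLast (by simp) = e := List.getLast_append_singleton ns
    have hdrop : (ns ++ [e]).dropLast = ns := by simp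
    rw [hlast, hdrop]
    by_cases he : e = 0
    · simp [he, ih]
    · simp [he]

-- ===== VERDICT (by name: the statement is the Claim_ definition above) =====
theorem nodes_trim_py_spec : Claim_equal_nodes_trim_py := by
  intro nodes _
  unfold Spec_nodes_trim_py
  exact main_eq nodes
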